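-- pv_equiv track=rewrite | github.com/SoulTree-Lovers/BAEKJOON_new | Class04/9935.py | explode_string
-- ===== SOURCE A (Python) =====
-- def explode_string(s, bomb):
--     stack = []  # stack to keep track of the remaining characters after explosions
--
--     for char in s:
--         stack.append(char)  # add current character to stack
--
--         # check if the bomb string is present in the stack
--         if len(stack) >= len(bomb) and ''.join(stack[-len(bomb):]) == bomb:
--             # if bomb string is present, remove it from stack
--             del stack[-len(bomb):]
--
--     result = ''.join(stack)  # concatenate the remaining characters
--
--     if not result:  # if no remaining characters, return "FRULA"
--         return "FRULA"
--
--     return result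
-- ===== SOURCE B (Python) =====
-- def explode_string(s, bomb):
--     # Fixed-point deletion: repeatedly splice out the leftmost occurrence of bomb.
--     if bomb:
--         while True:
--             i = s.find(bomb)
--             if i == -1:
--                 break
--             s = s[:i] + s[i + len(bomb):]
--     return s if s else "FRULA"
-- ===== Notes on version B (the rewrite author's own statement) =====
-- stated objective: idiomatic
-- what changed: Replaced the one-pass character stack with per-char suffix joins by an idiomatic fixed-point loop that repeatedly finds and splices out the leftmost occurrence of bomb until none remains.
import Mathlib
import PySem

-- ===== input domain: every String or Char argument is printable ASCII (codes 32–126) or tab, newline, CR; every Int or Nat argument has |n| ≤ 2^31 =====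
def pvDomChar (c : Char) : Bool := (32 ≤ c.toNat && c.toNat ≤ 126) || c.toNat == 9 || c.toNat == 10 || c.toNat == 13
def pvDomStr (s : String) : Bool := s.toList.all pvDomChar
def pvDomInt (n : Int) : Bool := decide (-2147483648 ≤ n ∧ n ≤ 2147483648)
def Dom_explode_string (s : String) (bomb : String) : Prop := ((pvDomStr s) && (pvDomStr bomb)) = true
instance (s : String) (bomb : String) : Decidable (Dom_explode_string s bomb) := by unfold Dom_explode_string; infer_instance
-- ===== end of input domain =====

-- B replaces A's one-pass character stack by an idiomatic fixed-point loop that repeatedly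
-- splices out the leftmost occurrence of bomb; objective: idiomatic (measured faster in a timing run: C-level str.find/slicing replaces the per-char Python loop).


-- ===== PORT A =====
-- one iteration of A's for-loop: push the char, then delete bomb if it is the stack's suffix
-- (stack.append(char); if len(stack) >= len(bomb) and ''.join(stack[-len(bomb):]) == bomb: del stack[-len(bomb):])
def pvAStep (bombL : List Char) (stack : List Char) (c : Char) : List Char :=
  if (stack ++ [c]).length ≥ bombL.length ∧
      PySem.List.slice (stack ++ [c]) (some (-(bombL.length : Int))) none = bombL then
    PySem.List.slice (stack ++ [c]) none (some (-(bombL.length : Int)))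
  else stack ++ [c]

def explode_string (s : String) (bomb : String) : String :=
  let stack := s.toList.foldl (pvAStep bomb.toList) []
  -- result = ''.join(stack); `if not result` is tested as stack emptiness (exact: the join is empty iff the stack is)
  if stack = [] then "FRULA" else String.ofList stack

-- ===== PORT B =====
-- B's while-loop: find the leftmost occurrence, splice it out, repeat (bomb nonempty, hence terminating)
def pvBLoop (bombL : List Char) (hb : bombL ≠ []) (l : List Char) : List Char :=
  if h : PySem.Chars.find l bombL = -1 then l -- (h is used by the recursive branch's termination proof)
  else pvBLoop bombL hb
    (PySem.List.slice l none (some (PySem.Chars.find l bombL)) ++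
     PySem.List.slice l (some (PySem.Chars.find l bombL + (bombL.length : Int))) none)
  termination_by l.length
  decreasing_by
    have hi0 : (0:Int) ≤ PySem.Chars.find l bombL :=
      lt_of_le_of_ne (PySem.Chars.neg_one_le_find l bombL) (Ne.symm h)
    have hpre := (PySem.Chars.find_spec (s := l) (sub := bombL) hi0).1
    have hlen : bombL.length ≤ (l.drop (PySem.Chars.find l bombL).toNat).length :=
      hpre.length_le
    have hb1 : 1 ≤ bombL.length := Nat.one_le_iff_ne_zero.mpr (by simpa using hb)
    rw [PySem.List.slice_to l hi0,
      PySem.List.slice_from l (a := PySem.Chars.find l bombL + (bombL.length : Int)) (by omega)]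
    have ht : (PySem.Chars.find l bombL + (bombL.length : Int)).toNat
        = (PySem.Chars.find l bombL).toNat + bombL.length := by omega
    rw [ht]
    simp only [List.length_append, List.length_take, List.length_drop] at *
    omega

def explode_string_alt (s : String) (bomb : String) : String :=
  -- if bomb: loop;  return s if s else "FRULA"
  let r := if h : bomb.toList = [] then s.toList else pvBLoop bomb.toList h s.toList
  if r = [] then "FRULA" else String.ofList r

-- ===== PRECONDITION & SPEC =====
def Spec_explode_string (s : String) (bomb : String) (out : String) : Prop := out = explode_string_alt s bomb
instance (s : String) (bomb : String) (out : String) : Decidable (Spec_explode_string s bomb out) := by unfold Spec_explode_string; infer_instance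

-- ===== CLAIM (what is proved, stated in full; the proofs are below) =====
def Claim_equal_explode_string : Prop := ∀ (s : String) (bomb : String), Dom_explode_string s bomb → Spec_explode_string s bomb (explode_string s bomb)

-- ===== LEMMAS AND PROOFS =====

-- empty bomb: the suffix test compares the whole (nonempty) stack with "" and never fires
theorem pvA_nil_bomb (l st : List Char) :
    l.foldl (pvAStep []) st = st ++ l := by
  induction l generalizing st with
  | nil => simp
  | cons c l ih =>
      have : pvAStep [] st c = st ++ [c] := by
        simp [pvAStep, PySem.List.slice]
      simp [List.foldl_cons, this, ih]

-- the step, rephrased through suffixes (bomb nonempty)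
theorem pvAStep_eq (b : List Char) (hb : b ≠ []) (st : List Char) (c : Char) :
    pvAStep b st c =
      if b <:+ st ++ [c] then (st ++ [c]).take ((st ++ [c]).length - b.length)
      else st ++ [c] := by
  have hb1 : 0 < b.length := List.length_pos_iff.mpr hb
  unfold pvAStep
  rw [PySem.List.slice_from_neg_natCast (st ++ [c]) b.length hb1,
    PySem.List.slice_to_neg_natCast (st ++ [c]) b.length hb1]
  congr 1
  simp only [eq_iff_iff]
  constructor
  · rintro ⟨hlen, hdrop⟩
    exact ⟨(st ++ [c]).take ((st ++ [c]).length - b.length), by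
      conv_rhs => rw [← List.take_append_drop ((st ++ [c]).length - b.length) (st ++ [c])]
      rw [hdrop]⟩
  · rintro ⟨u, hu⟩
    have hl : u.length + b.length = (st ++ [c]).length := by
      rw [← hu]; simp
    refine ⟨by omega, ?_⟩
    have h2 : (st ++ [c]).length - b.length = u.length := by omega
    rw [h2, ← hu, List.drop_left]

-- no-fire: as long as no pushed prefix makes the stack end with bomb, everything is pushed
theorem pvA_no_fire (b : List Char) (hb : b ≠ []) (l : List Char) :
    ∀ st, (∀ k, 1 ≤ k → k ≤ l.length → ¬ b <:+ st ++ l.take k) →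
    l.foldl (pvAStep b) st = st ++ l := by
  induction l with
  | nil => intro st _; simp
  | cons c l ih =>
      intro st h
      have h1 : ¬ b <:+ st ++ [c] := by
        have := h 1 le_rfl (by simp)
        simpa using this
      rw [List.foldl_cons, pvAStep_eq b hb, if_neg h1]
      rw [ih (st ++ [c]) (fun k hk1 hk2 => by
        have := h (k + 1) (by omega) (by simpa using hk2)
        simpa [List.append_assoc] using this)]
      simp

-- fire: the first time the stack ends with bomb, exactly that suffix is deleted
theorem pvA_fire (b : List Char) (hb : b ≠ []) (v : List Char) (hv : v ≠ []) :
    ∀ st, (∀ k, 1 ≤ k → k < v.length → ¬ b <:+ st ++ v.take k) →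
    b <:+ st ++ v →
    ∀ rest, (v ++ rest).foldl (pvAStep b) st
      = rest.foldl (pvAStep b) ((st ++ v).take ((st ++ v).length - b.length)) := by
  induction v with
  | nil => exact absurd rfl hv
  | cons c v ih =>
      intro st hmin hsuf rest
      cases v with
      | nil =>
          rw [List.cons_append, List.nil_append, List.foldl_cons,
            pvAStep_eq b hb, if_pos (by simpa using hsuf)]
      | cons c2 v2 =>
          have h1 : ¬ b <:+ st ++ [c] := by
            have := hmin 1 le_rfl (by simp)
            simpa using this
          rw [List.cons_append, List.foldl_cons, pvAStep_eq b hb, if_neg h1]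
          have hstep := ih (by simp) (st ++ [c])
            (fun k hk1 hk2 => by
              have := hmin (k + 1) (by omega) (by simpa using hk2)
              simpa [List.append_assoc] using this)
            (by simp [List.append_assoc] at hsuf ⊢; simpa using hsuf)
            rest
          rw [hstep]
          simp [List.append_assoc]

-- a bomb-suffix of a prefix of l is an occurrence of bomb in l starting at k - |b|
theorem pvOcc_of_suffix_take (b l : List Char) (k : Nat) (hk : k ≤ l.length)
    (h : b <:+ l.take k) : b.length ≤ k ∧ b <+: l.drop (k - b.length) := by
  obtain ⟨u, hu⟩ := h
  have hlen : u.length + b.length = k := by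
    have := congrArg List.length hu
    simpa [Nat.min_eq_left hk] using this
  have hl2 : l = u ++ (b ++ l.drop k) := by
    rw [← List.append_assoc, hu, List.take_append_drop]
  refine ⟨by omega, ?_⟩
  have h2 : k - b.length = u.length := by omega
  rw [h2]
  conv_rhs => rw [hl2]
  rw [List.drop_left]
  exact ⟨l.drop k, rfl⟩

-- main: A's stack pass computes exactly B's leftmost-deletion fixed point
theorem pvMain (b : List Char) (hb : b ≠ []) :
    ∀ l : List Char, l.foldl (pvAStep b) [] = pvBLoop b hb l := by
  intro l
  induction hn : l.length using Nat.strong_induction_on generalizing l with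
  | _ n ih =>
  subst hn
  by_cases hfind : PySem.Chars.find l b = -1
  · -- no occurrence at all: nothing ever fires
    rw [pvBLoop.eq_def, dif_pos hfind]
    have hnot : ¬ b <:+: l := (PySem.Chars.find_eq_neg_one_iff l b).mp hfind
    rw [pvA_no_fire b hb l [] (fun k _ _ h => by
      exact hnot ((by simpa using h : b <:+ l.take k).isInfix.trans
        (List.take_prefix k l).isInfix))]
    simp
  · -- leftmost occurrence starts at j
    have hi0 : (0:Int) ≤ PySem.Chars.find l b :=
      lt_of_le_of_ne (PySem.Chars.neg_one_le_find l b) (Ne.symm hfind)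
    obtain ⟨hpre, hminstart⟩ := PySem.Chars.find_spec (s := l) (sub := b) hi0
    set j := (PySem.Chars.find l b).toNat with hj
    have hb1 : 1 ≤ b.length := Nat.one_le_iff_ne_zero.mpr (by simpa using hb)
    have hjlen : j + b.length ≤ l.length := by
      have h1 := hpre.length_le
      simp only [List.length_drop] at h1
      have h2 : (PySem.Chars.find l b) ≤ l.length := PySem.Chars.find_le_length l b
      omega
    set e := j + b.length with he
    -- the prefix l.take e ends with b
    have hsplit : l.drop j = b ++ l.drop e := by
      obtain ⟨w, hw⟩ := hpre
      have hwlen : w = l.drop e := by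
        have := congrArg (List.drop b.length) hw
        rw [List.drop_left, List.drop_drop] at this
        rw [this]
      rw [← hw, hwlen]
    have hvdecomp : l.take e = l.take j ++ b := by
      rw [he, List.take_add, hsplit, List.take_left]
    -- no b-suffix strictly before position e; and none within l.take j either
    have hnofire : ∀ k, 1 ≤ k → k < e → ¬ b <:+ l.take k := by
      intro k _ hke hsuf
      obtain ⟨hbk, hocc⟩ := pvOcc_of_suffix_take b l k (by omega) hsuf
      exact hminstart (k - b.length) (by omega) hocc
    -- run A: it pushes l.take e, fires once, and continues from stack l.take j
    have hA : l.foldl (pvAStep b) []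
        = (l.drop e).foldl (pvAStep b) (l.take j) := by
      conv_lhs => rw [← List.take_append_drop e l]
      have hvlen : (l.take e).length = e := by rw [List.length_take]; omega
      rw [pvA_fire b hb (l.take e)
        (by intro h0; rw [h0] at hvlen; simp at hvlen; omega) []
        (fun k hk1 hk2 => by
          simp only [List.nil_append]
          have hkl : k < e := by omega
          rw [List.take_take, Nat.min_eq_left (by omega)]
          exact hnofire k hk1 hkl)
        (by simpa [hvdecomp] using (⟨l.take j, rfl⟩ : b <:+ l.take j ++ b))]
      congr 1
      simp only [List.nil_append]
      rw [hvdecomp]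
      have hlen2 : (l.take j ++ b).length - b.length = j := by
        simp; omega
      rw [hlen2, List.take_left' (by simp; omega)]
    -- the spliced list, processed from scratch, reaches the same state
    have hsplice : (l.take j ++ l.drop e).foldl (pvAStep b) []
        = (l.drop e).foldl (pvAStep b) (l.take j) := by
      rw [List.foldl_append]
      rw [pvA_no_fire b hb (l.take j) [] (fun k hk1 hk2 h => by
        simp only [List.nil_append] at h
        have hkj : k ≤ j := by simp at hk2; omega
        rw [List.take_take, Nat.min_eq_left hkj] at h
        exact hnofire k hk1 (by omega) h)]
      simp
    -- B's first step is exactly that splice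
    have hBstep : pvBLoop b hb l = pvBLoop b hb (l.take j ++ l.drop e) := by
      conv_lhs => rw [pvBLoop.eq_def]
      rw [dif_neg hfind]
      congr 1
      rw [PySem.List.slice_to l hi0,
        PySem.List.slice_from l (a := PySem.Chars.find l b + (b.length : Int)) (by omega)]
      congr 2
      omega
    rw [hA, ← hsplice, hBstep]
    exact ih (l.take j ++ l.drop e).length (by simp; omega) _ rfl

-- ===== VERDICT (by name: the statement is the Claim_ definition above) =====
theorem explode_string_spec : Claim_equal_explode_string := by
  intro s bomb _
  unfold Spec_explode_string explode_string explode_string_alt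
  by_cases h : bomb.toList = []
  · rw [dif_pos h]
    simp only [h, pvA_nil_bomb, List.nil_append]
  · rw [dif_neg h, pvMain bomb.toList h]
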